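-- pv_equiv track=rewrite | github.com/Nikhil04-ai/Blindmate-app | app.py | enhance_search_terms
-- ===== SOURCE A (Python) =====
-- def enhance_search_terms(address):
--     """Enhance generic search terms for better geocoding results"""
--     address_lower = address.lower().strip()
--
--     # Add "near me" to generic terms to get local results
--     generic_terms = {
--         'library': 'library near me',
--         'hospital': 'hospital near me',
--         'school': 'school near me',
--         'restaurant': 'restaurant near me',
--         'pharmacy': 'pharmacy near me',
--         'bank': 'bank near me',
--         'grocery store': 'grocery store near me',
--         'gas station': 'gas station near me',
--         'shopping mall': 'shopping mall near me',
--         'park': 'park near me',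
--         'gym': 'gym near me',
--         'university': 'university near me',
--         'college': 'college near me',
--         'airport': 'airport near me',
--         'train station': 'train station near me',
--         'bus station': 'bus station near me',
--         'hotel': 'hotel near me',
--         'cinema': 'cinema near me',
--         'movie theater': 'movie theater near me',
--         'coffee shop': 'coffee shop near me',
--         'post office': 'post office near me'
--     }
--
--     # Check if it's a generic term
--     for term, enhanced in generic_terms.items():
--         if address_lower == term or address_lower == term + 's':
--             return enhanced
--
--     # If it's already a specific address, return as is
--     return address
-- ===== SOURCE B (Python) =====
-- # Simpler: every stored value is just key + ' near me', so keep only the 21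
-- # generic terms in a set and build the enhanced string by concatenation.
-- _GENERIC_TERMS = frozenset([
--     'library', 'hospital', 'school', 'restaurant', 'pharmacy', 'bank',
--     'grocery store', 'gas station', 'shopping mall', 'park', 'gym',
--     'university', 'college', 'airport', 'train station', 'bus station',
--     'hotel', 'cinema', 'movie theater', 'coffee shop', 'post office',
-- ])
--
-- def enhance_search_terms(address):
--     """Enhance generic search terms for better geocoding results"""
--     a = address.lower().strip()
--     if a in _GENERIC_TERMS:
--         return a + ' near me'
--     if a.endswith('s') and a[:-1] in _GENERIC_TERMS:
--         return a[:-1] + ' near me'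
--     return address
-- ===== Notes on version B (the rewrite author's own statement) =====
-- stated objective: simpler
-- what changed: Replaces the loop over 21 stored key->value pairs by a set of the 21 generic terms with the enhanced string derived by concatenation of the suffix, handling plurals via a trailing-letter check plus a single stem lookup instead of comparing against each pluralised key.
import Mathlib
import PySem

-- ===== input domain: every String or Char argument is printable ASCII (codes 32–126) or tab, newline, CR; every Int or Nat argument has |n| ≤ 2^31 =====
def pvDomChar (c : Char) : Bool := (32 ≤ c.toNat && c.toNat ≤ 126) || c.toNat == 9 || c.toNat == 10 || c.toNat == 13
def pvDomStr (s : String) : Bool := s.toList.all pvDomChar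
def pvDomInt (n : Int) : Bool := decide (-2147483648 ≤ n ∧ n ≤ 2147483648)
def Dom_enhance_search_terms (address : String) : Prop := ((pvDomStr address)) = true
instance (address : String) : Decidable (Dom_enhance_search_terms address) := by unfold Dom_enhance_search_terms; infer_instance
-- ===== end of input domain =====

-- B derives the enhanced string by concatenation from a set of the 21 generic terms
-- instead of scanning stored key→value pairs; same return value, simpler structure.

-- ===== PORT A =====
-- the generic_terms dict of A, in insertion order
def pvGeneric : List (List Char × List Char) := [
  ("library".toList, "library near me".toList),
  ("hospital".toList, "hospital near me".toList),
  ("school".toList, "school near me".toList),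
  ("restaurant".toList, "restaurant near me".toList),
  ("pharmacy".toList, "pharmacy near me".toList),
  ("bank".toList, "bank near me".toList),
  ("grocery store".toList, "grocery store near me".toList),
  ("gas station".toList, "gas station near me".toList),
  ("shopping mall".toList, "shopping mall near me".toList),
  ("park".toList, "park near me".toList),
  ("gym".toList, "gym near me".toList),
  ("university".toList, "university near me".toList),
  ("college".toList, "college near me".toList),
  ("airport".toList, "airport near me".toList),
  ("train station".toList, "train station near me".toList),
  ("bus station".toList, "bus station near me".toList),
  ("hotel".toList, "hotel near me".toList),
  ("cinema".toList, "cinema near me".toList),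
  ("movie theater".toList, "movie theater near me".toList),
  ("coffee shop".toList, "coffee shop near me".toList),
  ("post office".toList, "post office near me".toList)]

-- the for-loop of A with its early return (none = fell through)
def pvLoopA (a : List Char) : List (List Char × List Char) → Option (List Char)
  | [] => none
  | (t, e) :: rest => if a = t ∨ a = t ++ ['s'] then some e else pvLoopA a rest

def enhance_search_terms (address : String) : String :=
  let a := PySem.Chars.strip (PySem.Chars.lower address.toList)
  match pvLoopA a pvGeneric with
  | some e => String.ofList e
  | none => address

-- ===== PORT B =====
-- the set of generic terms of B
def pvTerms : List (List Char) := [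
  "library".toList,
  "hospital".toList,
  "school".toList,
  "restaurant".toList,
  "pharmacy".toList,
  "bank".toList,
  "grocery store".toList,
  "gas station".toList,
  "shopping mall".toList,
  "park".toList,
  "gym".toList,
  "university".toList,
  "college".toList,
  "airport".toList,
  "train station".toList,
  "bus station".toList,
  "hotel".toList,
  "cinema".toList,
  "movie theater".toList,
  "coffee shop".toList,
  "post office".toList]

def enhance_search_terms_alt (address : String) : String :=
  let a := PySem.Chars.strip (PySem.Chars.lower address.toList)
  if a ∈ pvTerms then String.ofList (a ++ " near me".toList)
  else if PySem.Chars.endswith a ['s'] = true ∧ PySem.Chars.slice a none (some (-1)) ∈ pvTerms then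
    String.ofList (PySem.Chars.slice a none (some (-1)) ++ " near me".toList)
  else address

-- ===== PRECONDITION & SPEC =====
def Spec_enhance_search_terms (address : String) (out : String) : Prop := out = enhance_search_terms_alt address
instance (address : String) (out : String) : Decidable (Spec_enhance_search_terms address out) := by unfold Spec_enhance_search_terms; infer_instance

-- ===== CLAIM (what is proved, stated in full; the proofs are below) =====
def Claim_equal_enhance_search_terms : Prop := ∀ (address : String), Dom_enhance_search_terms address → Spec_enhance_search_terms address (enhance_search_terms address)

-- ===== LEMMAS AND PROOFS =====

lemma pv_plural_iff (a t : List Char) : a = t ++ ['s'] ↔ ['s'] <:+ a ∧ a.dropLast = t := by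
  constructor
  · rintro rfl; exact ⟨⟨t, rfl⟩, by simp⟩
  · rintro ⟨⟨b, rfl⟩, h⟩
    simp at h
    subst h; rfl

lemma pv_key (a : List Char) :
    pvLoopA a pvGeneric =
      (if a ∈ pvTerms then some (a ++ " near me".toList)
       else if PySem.Chars.endswith a ['s'] = true ∧ PySem.Chars.slice a none (some (-1)) ∈ pvTerms then
         some (PySem.Chars.slice a none (some (-1)) ++ " near me".toList)
       else none) := by
  by_cases h0 : a = "library".toList
  · subst h0; decide
  by_cases g0 : a = "library".toList ++ ['s']
  · subst g0; decide
  by_cases h1 : a = "hospital".toList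
  · subst h1; decide
  by_cases g1 : a = "hospital".toList ++ ['s']
  · subst g1; decide
  by_cases h2 : a = "school".toList
  · subst h2; decide
  by_cases g2 : a = "school".toList ++ ['s']
  · subst g2; decide
  by_cases h3 : a = "restaurant".toList
  · subst h3; decide
  by_cases g3 : a = "restaurant".toList ++ ['s']
  · subst g3; decide
  by_cases h4 : a = "pharmacy".toList
  · subst h4; decide
  by_cases g4 : a = "pharmacy".toList ++ ['s']
  · subst g4; decide
  by_cases h5 : a = "bank".toList
  · subst h5; decide
  by_cases g5 : a = "bank".toList ++ ['s']
  · subst g5; decide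
  by_cases h6 : a = "grocery store".toList
  · subst h6; decide
  by_cases g6 : a = "grocery store".toList ++ ['s']
  · subst g6; decide
  by_cases h7 : a = "gas station".toList
  · subst h7; decide
  by_cases g7 : a = "gas station".toList ++ ['s']
  · subst g7; decide
  by_cases h8 : a = "shopping mall".toList
  · subst h8; decide
  by_cases g8 : a = "shopping mall".toList ++ ['s']
  · subst g8; decide
  by_cases h9 : a = "park".toList
  · subst h9; decide
  by_cases g9 : a = "park".toList ++ ['s']
  · subst g9; decide
  by_cases h10 : a = "gym".toList
  · subst h10; decide
  by_cases g10 : a = "gym".toList ++ ['s']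
  · subst g10; decide
  by_cases h11 : a = "university".toList
  · subst h11; decide
  by_cases g11 : a = "university".toList ++ ['s']
  · subst g11; decide
  by_cases h12 : a = "college".toList
  · subst h12; decide
  by_cases g12 : a = "college".toList ++ ['s']
  · subst g12; decide
  by_cases h13 : a = "airport".toList
  · subst h13; decide
  by_cases g13 : a = "airport".toList ++ ['s']
  · subst g13; decide
  by_cases h14 : a = "train station".toList
  · subst h14; decide
  by_cases g14 : a = "train station".toList ++ ['s']
  · subst g14; decide
  by_cases h15 : a = "bus station".toList
  · subst h15; decide
  by_cases g15 : a = "bus station".toList ++ ['s']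
  · subst g15; decide
  by_cases h16 : a = "hotel".toList
  · subst h16; decide
  by_cases g16 : a = "hotel".toList ++ ['s']
  · subst g16; decide
  by_cases h17 : a = "cinema".toList
  · subst h17; decide
  by_cases g17 : a = "cinema".toList ++ ['s']
  · subst g17; decide
  by_cases h18 : a = "movie theater".toList
  · subst h18; decide
  by_cases g18 : a = "movie theater".toList ++ ['s']
  · subst g18; decide
  by_cases h19 : a = "coffee shop".toList
  · subst h19; decide
  by_cases g19 : a = "coffee shop".toList ++ ['s']
  · subst g19; decide
  by_cases h20 : a = "post office".toList
  · subst h20; decide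
  by_cases g20 : a = "post office".toList ++ ['s']
  · subst g20; decide
  have hmem : a ∉ pvTerms := by
    simp only [pvTerms, List.mem_cons, List.not_mem_nil, or_false]
    rintro (h|h|h|h|h|h|h|h|h|h|h|h|h|h|h|h|h|h|h|h|h)
    exacts [h0 h, h1 h, h2 h, h3 h, h4 h, h5 h, h6 h, h7 h, h8 h, h9 h, h10 h, h11 h, h12 h, h13 h, h14 h, h15 h, h16 h, h17 h, h18 h, h19 h, h20 h]
  have hplu : ¬ (PySem.Chars.endswith a ['s'] = true ∧ PySem.Chars.slice a none (some (-1)) ∈ pvTerms) := by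
    rintro ⟨hsfx, hm⟩
    rw [show PySem.Chars.slice a none (some (-1)) = a.dropLast from by
      simp [PySem.Chars.slice_eq_listSlice, PySem.List.slice_to_neg_one]] at hm
    have hsuf : ['s'] <:+ a := (PySem.Chars.endswith_iff a ['s']).mp hsfx
    simp only [pvTerms, List.mem_cons, List.not_mem_nil, or_false] at hm
    rcases hm with h|h|h|h|h|h|h|h|h|h|h|h|h|h|h|h|h|h|h|h|h
    exacts [g0 ((pv_plural_iff a _).mpr ⟨hsuf, h⟩), g1 ((pv_plural_iff a _).mpr ⟨hsuf, h⟩), g2 ((pv_plural_iff a _).mpr ⟨hsuf, h⟩), g3 ((pv_plural_iff a _).mpr ⟨hsuf, h⟩), g4 ((pv_plural_iff a _).mpr ⟨hsuf, h⟩), g5 ((pv_plural_iff a _).mpr ⟨hsuf, h⟩), g6 ((pv_plural_iff a _).mpr ⟨hsuf, h⟩), g7 ((pv_plural_iff a _).mpr ⟨hsuf, h⟩), g8 ((pv_plural_iff a _).mpr ⟨hsuf, h⟩), g9 ((pv_plural_iff a _).mpr ⟨hsuf, h⟩), g10 ((pv_plural_iff a _).mpr ⟨hsuf, h⟩), g11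 ((pv_plural_iff a _).mpr ⟨hsuf, h⟩), g12 ((pv_plural_iff a _).mpr ⟨hsuf, h⟩), g13 ((pv_plural_iff a _).mpr ⟨hsuf, h⟩), g14 ((pv_plural_iff a _).mpr ⟨hsuf, h⟩), g15 ((pv_plural_iff a _).mpr ⟨hsuf, h⟩), g16 ((pv_plural_iff a _).mpr ⟨hsuf, h⟩), g17 ((pv_plural_iff a _).mpr ⟨hsuf, h⟩), g18 ((pv_plural_iff a _).mpr ⟨hsuf, h⟩), g19 ((pv_plural_iff a _).mpr ⟨hsuf, h⟩), g20 ((pv_plural_iff a _).mpr ⟨hsuf, h⟩)]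
  rw [if_neg hmem, if_neg hplu]
  simp only [pvGeneric, pvLoopA, h0, h1, h2, h3, h4, h5, h6, h7, h8, h9, h10, h11, h12, h13, h14, h15, h16, h17, h18, h19, h20, g0, g1, g2, g3, g4, g5, g6, g7, g8, g9, g10, g11, g12, g13, g14, g15, g16, g17, g18, g19, g20, or_self, if_false]

-- ===== VERDICT (by name: the statement is the Claim_ definition above) =====
theorem enhance_search_terms_spec : Claim_equal_enhance_search_terms := by
  intro address _
  simp only [Spec_enhance_search_terms, enhance_search_terms, enhance_search_terms_alt]
  rw [pv_key]
  split_ifs <;> rfl
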